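-- pv_equiv track=rewrite | github.com/pypi-data/pypi-mirror-401 | packages/agentic-coder/agentic_coder-0.6.0-py3-none-any.whl/coding_agent_plugin/cli/main.py | _infer_filename
-- ===== SOURCE A (Python) =====
-- def _infer_filename(prompt: str) -> str:
--     """
--     Infer filename from prompt using simple heuristics.
--
--     Examples:
--         "add login endpoint" -> "auth.py"
--         "create user model" -> "user.py"
--         "fix database query" -> "database.py"
--     """
--     import re
--
--     prompt_lower = prompt.lower()
--
--     # Common patterns
--     if "login" in prompt_lower or "auth" in prompt_lower:
--         return "auth.py"
--     elif "user" in prompt_lower: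
--         return "user.py"
--     elif "model" in prompt_lower:
--         return "models.py"
--     elif "endpoint" in prompt_lower or "route" in prompt_lower or "api" in prompt_lower:
--         return "routes.py"
--     elif "database" in prompt_lower or "db" in prompt_lower:
--         return "database.py"
--     elif "config" in prompt_lower or "setting" in prompt_lower:
--         return "config.py"
--     elif "test" in prompt_lower:
--         return "test.py"
--     elif "util" in prompt_lower or "helper" in prompt_lower:
--         return "utils.py"
--
--     # Extract first meaningful word
--     words = re.findall(r'\b[a-z]{3,}\b', prompt_lower)
--     if words:
--         # Skip common words
--         skip_words = {'add', 'create', 'fix', 'update', 'delete', 'make', 'build', 'write'}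
--         for word in words:
--             if word not in skip_words:
--                 return f"{word}.py"
--
--     # Default
--     return "main.py"
-- ===== SOURCE B (Python) =====
-- def _infer_filename(prompt: str) -> str:
--     p = prompt.lower()
--     rules = [
--         (("login", "auth"), "auth.py"),
--         (("user",), "user.py"),
--         (("model",), "models.py"),
--         (("endpoint", "route", "api"), "routes.py"),
--         (("database", "db"), "database.py"),
--         (("config", "setting"), "config.py"),
--         (("test",), "test.py"),
--         (("util", "helper"), "utils.py"),
--     ]
--     for keys, fname in rules:
--         if any(k in p for k in keys):
--             return fname
--     # single-pass scanner instead of regex: maximal word-char runs, first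
--     # pure-alphabetic run of length >= 3 that is not a filler verb
--     skip = {'add', 'create', 'fix', 'update', 'delete', 'make', 'build', 'write'}
--     best = None
--     word = ""
--     for ch in p + "\n":  # sentinel flushes the last run
--         if ch.isalnum() or ch == "_":
--             word += ch
--         else:
--             if best is None and len(word) >= 3 and word.isalpha() and word not in skip:
--                 best = word
--             word = ""
--     return f"{best}.py" if best is not None else "main.py"
-- ===== Notes on version B (the rewrite author's own statement) =====
-- stated objective: simpler
-- what changed: The if/elif keyword cascade becomes an ordered rule table scanned for the first match, and the regex findall plus two-stage skip loop becomes a single-pass character scanner with a sentinel that yields the first valid word run directly.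
import Mathlib
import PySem

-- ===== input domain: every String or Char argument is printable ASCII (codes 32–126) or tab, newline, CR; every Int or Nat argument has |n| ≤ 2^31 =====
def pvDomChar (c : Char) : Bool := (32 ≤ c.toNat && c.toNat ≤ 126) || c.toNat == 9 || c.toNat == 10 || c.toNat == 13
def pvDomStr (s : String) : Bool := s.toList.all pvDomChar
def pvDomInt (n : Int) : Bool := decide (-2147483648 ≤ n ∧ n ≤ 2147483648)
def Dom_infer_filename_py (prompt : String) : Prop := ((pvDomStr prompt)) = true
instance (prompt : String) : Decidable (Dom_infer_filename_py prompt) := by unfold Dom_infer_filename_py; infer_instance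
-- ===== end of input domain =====

-- B replaces A's if/elif keyword cascade by an ordered rule table scanned with find?,
-- and A's regex word extraction + two-stage skip loop by a single-pass sentinel scanner
-- over the characters; objective: simpler/alternative structure, same results.

-- ===== PORT A =====

-- regex word character \w = [A-Za-z0-9_] (exact on the ASCII domain)
def pyWordCharA (c : Char) : Bool := PySem.Chars.isalnum c || c == '_'

-- re.findall(r'\b[a-z]{3,}\b', s) on the lowered ASCII prompt, ported by hand:
-- the matches are exactly the maximal \w-runs of s that consist of letters only
-- and have length ≥ 3 (exact on the lowered ASCII domain, where letters are a-z).
def reRunsA : List Char → List (List Char)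
  | [] => []
  | c :: rest =>
    if hc : pyWordCharA c then
      ((c :: rest).takeWhile pyWordCharA) :: reRunsA ((c :: rest).dropWhile pyWordCharA)
    else reRunsA rest
  termination_by cs => cs.length
  decreasing_by
    · simpa [List.dropWhile_cons, hc] using
        Nat.lt_succ_of_le (List.length_dropWhile_le pyWordCharA rest)
    · simp

def findallA (cs : List Char) : List (List Char) :=
  (reRunsA cs).filter (fun w => decide (3 ≤ w.length) && w.all PySem.Chars.isalpha)

def skipWordsA : List (List Char) :=
  ["add".toList, "create".toList, "fix".toList, "update".toList,
   "delete".toList, "make".toList, "build".toList, "write".toList]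

-- 'for word in words: if word not in skip_words: return f"{word}.py"', then the default
def firstWordA : List (List Char) → String
  | [] => "main.py"
  | w :: ws => if skipWordsA.contains w then firstWordA ws else String.ofList (w ++ ".py".toList)

def infer_filename_py (prompt : String) : String :=
  let p := PySem.Str.lower prompt
  if PySem.Str.isIn "login" p || PySem.Str.isIn "auth" p then "auth.py"
  else if PySem.Str.isIn "user" p then "user.py"
  else if PySem.Str.isIn "model" p then "models.py"
  else if PySem.Str.isIn "endpoint" p || PySem.Str.isIn "route" p || PySem.Str.isIn "api" p then "routes.py"
  else if PySem.Str.isIn "database" p || PySem.Str.isIn "db" p then "database.py"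
  else if PySem.Str.isIn "config" p || PySem.Str.isIn "setting" p then "config.py"
  else if PySem.Str.isIn "test" p then "test.py"
  else if PySem.Str.isIn "util" p || PySem.Str.isIn "helper" p then "utils.py"
  else
    let words := findallA p.toList
    if words ≠ [] then firstWordA words else "main.py"

-- ===== PORT B =====

def rulesB : List (List String × String) :=
  [ (["login", "auth"], "auth.py"),
    (["user"], "user.py"),
    (["model"], "models.py"),
    (["endpoint", "route", "api"], "routes.py"),
    (["database", "db"], "database.py"),
    (["config", "setting"], "config.py"),
    (["test"], "test.py"),
    (["util", "helper"], "utils.py") ]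

def skipB : PySem.Set (List Char) :=
  PySem.Set.ofList ["add".toList, "create".toList, "fix".toList, "update".toList,
                    "delete".toList, "make".toList, "build".toList, "write".toList]

-- 'best is None and len(word) >= 3 and word.isalpha() and word not in skip' (best-is-None checked at call site)
def validB (w : List Char) : Bool :=
  decide (3 ≤ w.length) && PySem.Chars.strIsalpha w && !(PySem.Set.contains skipB w)

-- the for-loop over p + "\n" with state (word, best)
def scanB : List Char → List Char → Option (List Char) → Option (List Char)
  | [], _, best => best
  | c :: rest, word, best =>
    if PySem.Chars.isalnum c || c == '_' then scanB rest (word ++ [c]) best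
    else scanB rest [] (if best.isNone && validB word then some word else best)

def infer_filename_py_alt (prompt : String) : String :=
  let p := PySem.Str.lower prompt
  match rulesB.find? (fun r => r.1.any (fun k => PySem.Str.isIn k p)) with
  | some r => r.2
  | none =>
    match scanB (p.toList ++ ['\n']) [] none with
    | some w => String.ofList (w ++ ".py".toList)
    | none => "main.py"

-- ===== PRECONDITION & SPEC =====
def Spec_infer_filename_py (prompt : String) (out : String) : Prop := out = infer_filename_py_alt prompt
instance (prompt : String) (out : String) : Decidable (Spec_infer_filename_py prompt out) := by unfold Spec_infer_filename_py; infer_instance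

-- ===== CLAIM (what is proved, stated in full; the proofs are below) =====
def Claim_equal_infer_filename_py : Prop := ∀ (prompt : String), Dom_infer_filename_py prompt → Spec_infer_filename_py prompt (infer_filename_py prompt)

-- ===== LEMMAS AND PROOFS =====

-- the once-kept best is returned unchanged
theorem scanB_some (cs word : List Char) (v : List Char) :
    scanB cs word (some v) = some v := by
  induction cs generalizing word with
  | nil => rfl
  | cons c rest ih =>
      simp only [scanB, Option.isNone_some, Bool.false_and]
      split <;> exact ih _

theorem takeWhile_dropWhile_run (word : List Char) (c : Char) (t : List Char)
    (hw : word.all pyWordCharA) (hc : pyWordCharA c = false) :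
    (word ++ c :: t).takeWhile pyWordCharA = word ∧
    (word ++ c :: t).dropWhile pyWordCharA = c :: t := by
  induction word with
  | nil => simp [hc]
  | cons w ws ih =>
      simp only [List.all_cons, Bool.and_eq_true] at hw
      simp [hw.1, ih hw.2]

theorem reRunsA_run_cons (word : List Char) (c : Char) (t : List Char)
    (hne : word ≠ []) (hw : word.all pyWordCharA) (hc : pyWordCharA c = false) :
    reRunsA (word ++ c :: t) = word :: reRunsA t := by
  obtain ⟨w, ws, rfl⟩ := List.exists_cons_of_ne_nil hne
  simp only [List.all_cons, Bool.and_eq_true] at hw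
  have h := takeWhile_dropWhile_run (w :: ws) c t (by simp [hw.1, hw.2]) hc
  rw [List.cons_append, reRunsA]
  simp only [← List.cons_append, h.1, h.2, hw.1, dif_pos]
  rw [reRunsA]
  simp [hc]

theorem reRunsA_all (word : List Char) (hw : word.all pyWordCharA) :
    reRunsA word = if word = [] then [] else [word] := by
  cases word with
  | nil => simp [reRunsA]
  | cons w ws =>
      simp only [List.all_cons, Bool.and_eq_true] at hw
      rw [reRunsA]
      have htd : (w :: ws).takeWhile pyWordCharA = w :: ws ∧
          (w :: ws).dropWhile pyWordCharA = [] := by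
        constructor
        · exact List.takeWhile_eq_self_iff.mpr (by
            intro x hx
            rcases List.mem_cons.mp hx with hx | hx
            · simpa [hx] using hw.1
            · exact (List.all_eq_true.mp hw.2) x hx)
        · exact List.dropWhile_eq_nil_iff.mpr (by
            intro x hx
            rcases List.mem_cons.mp hx with hx | hx
            · simpa [hx] using hw.1
            · exact (List.all_eq_true.mp hw.2) x hx)
      simp [htd.1, htd.2, hw.1, reRunsA]

-- B's skip set is A's skip list (the literal has no duplicates)
theorem skipB_eq : (skipB : List (List Char)) = skipWordsA := by decide

-- the filter predicate of A's findall combined with the skip test IS validB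
theorem pred_eq (w : List Char) :
    ((decide (3 ≤ w.length) && w.all PySem.Chars.isalpha) && !(skipWordsA.contains w)) = validB w := by
  by_cases h3 : 3 ≤ w.length
  · cases w with
    | nil => simp at h3
    | cons x xs =>
        simp [validB, PySem.Chars.strIsalpha, PySem.Set.contains, skipB_eq, Bool.and_assoc]
  · simp [validB, h3]

-- A's skip loop over the filtered words, as a find? with the combined predicate
theorem firstWordA_filter (rs : List (List Char)) :
    firstWordA (rs.filter (fun w => decide (3 ≤ w.length) && w.all PySem.Chars.isalpha)) =
      match rs.find? validB with
      | some w => String.ofList (w ++ ".py".toList)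
      | none => "main.py" := by
  induction rs with
  | nil => rfl
  | cons w rs ih =>
      by_cases hq : (decide (3 ≤ w.length) && w.all PySem.Chars.isalpha) = true
      · by_cases hs : skipWordsA.contains w
        · have hv : validB w = false := by
            rw [← pred_eq]
            have hm : w ∈ skipWordsA := by simpa using hs
            simp [hm]
          simp only [List.filter_cons, hq, if_true, List.find?_cons, hv]
          rw [firstWordA, if_pos hs, ih]
        · have hv : validB w = true := by
            rw [← pred_eq, hq]
            simpa using hs
          simp only [List.filter_cons, hq, if_true, List.find?_cons, hv]
          rw [firstWordA, if_neg hs]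
      · have hv : validB w = false := by
          rw [← pred_eq]
          simp only [Bool.not_eq_true] at hq
          simp [hq]
        simp only [List.filter_cons, hq, Bool.false_eq_true, if_false, List.find?_cons, hv]
        exact ih

-- the single-pass scanner computes the first valid maximal word run
theorem scanB_eq_find (cs : List Char) :
    ∀ word, word.all pyWordCharA →
      scanB (cs ++ ['\n']) word none = (reRunsA (word ++ cs)).find? validB := by
  induction cs with
  | nil =>
      intro word hw
      have hnl : (PySem.Chars.isalnum '\n' || '\n' == '_') = false := by decide
      simp only [List.nil_append, List.append_nil, scanB, hnl, Option.isNone_none,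
        Bool.true_and, reRunsA_all word hw]
      by_cases hword : word = []
      · subst hword; simp [validB]
      · simp only [if_neg hword]
        by_cases hv : validB word = true
        · simp [hv]
        · simp only [Bool.not_eq_true] at hv
          simp [hv]
  | cons c rest ih =>
      intro word hw
      by_cases hc : pyWordCharA c = true
      · have hc' : (PySem.Chars.isalnum c || c == '_') = true := hc
        rw [List.cons_append, scanB, if_pos hc']
        have := ih (word ++ [c]) (by simp_all [pyWordCharA, List.all_append])
        rw [this, List.append_assoc]
        rfl
      · have hc' : (PySem.Chars.isalnum c || c == '_') = false := by
          simpa [pyWordCharA] using hc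
        simp only [Bool.not_eq_true] at hc
        rw [List.cons_append, scanB, if_neg (by simp [hc'])]
        simp only [Option.isNone_none, Bool.true_and]
        by_cases hv : validB word = true
        · have hne : word ≠ [] := by
            intro h; subst h; simp [validB] at hv
          rw [if_pos hv, scanB_some, reRunsA_run_cons word c rest hne hw hc,
            List.find?_cons_of_pos hv]
        · simp only [Bool.not_eq_true] at hv
          rw [if_neg (by simp [hv]), ih [] (by simp)]
          by_cases hword : word = []
          · subst hword
            simp only [List.nil_append]
            rw [reRunsA]
            simp [hc]
          · rw [reRunsA_run_cons word c rest hword hw hc,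
              List.find?_cons_of_neg (p := validB) (by simp [hv])]
            simp

-- the fallback branches agree
theorem fallback_eq (cs : List Char) :
    (if findallA cs ≠ [] then firstWordA (findallA cs) else "main.py") =
      match scanB (cs ++ ['\n']) [] none with
      | some w => String.ofList (w ++ ".py".toList)
      | none => "main.py" := by
  rw [scanB_eq_find cs [] (by simp), List.nil_append]
  have h := firstWordA_filter (reRunsA cs)
  by_cases hne : findallA cs = []
  · rw [if_neg (by simp [hne])]
    unfold findallA at hne h
    rw [hne] at h
    simpa [firstWordA] using h
  · rw [if_pos hne]
    exact h

-- ===== VERDICT (by name: the statement is the Claim_ definition above) =====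
theorem infer_filename_py_spec : Claim_equal_infer_filename_py := by
  intro prompt _
  unfold Spec_infer_filename_py infer_filename_py infer_filename_py_alt rulesB
  simp only [List.find?_cons, List.any_cons, List.any_nil, Bool.or_false, ← Bool.or_assoc]
  set p := PySem.Str.lower prompt with hp
  by_cases h1 : (PySem.Str.isIn "login" p || PySem.Str.isIn "auth" p) = true
  · rw [if_pos h1, h1]
  · rw [if_neg h1, (Bool.not_eq_true _).mp h1]
    by_cases h2 : PySem.Str.isIn "user" p = true
    · rw [if_pos h2, h2]
    · rw [if_neg h2, (Bool.not_eq_true _).mp h2]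
      by_cases h3 : PySem.Str.isIn "model" p = true
      · rw [if_pos h3, h3]
      · rw [if_neg h3, (Bool.not_eq_true _).mp h3]
        by_cases h4 : (PySem.Str.isIn "endpoint" p || PySem.Str.isIn "route" p || PySem.Str.isIn "api" p) = true
        · rw [if_pos h4, h4]
        · rw [if_neg h4, (Bool.not_eq_true _).mp h4]
          by_cases h5 : (PySem.Str.isIn "database" p || PySem.Str.isIn "db" p) = true
          · rw [if_pos h5, h5]
          · rw [if_neg h5, (Bool.not_eq_true _).mp h5]
            by_cases h6 : (PySem.Str.isIn "config" p || PySem.Str.isIn "setting" p) = true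
            · rw [if_pos h6, h6]
            · rw [if_neg h6, (Bool.not_eq_true _).mp h6]
              by_cases h7 : PySem.Str.isIn "test" p = true
              · rw [if_pos h7, h7]
              · rw [if_neg h7, (Bool.not_eq_true _).mp h7]
                by_cases h8 : (PySem.Str.isIn "util" p || PySem.Str.isIn "helper" p) = true
                · rw [if_pos h8, h8]
                · rw [if_neg h8, (Bool.not_eq_true _).mp h8]
                  exact fallback_eq p.toList
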